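-- pv_equiv track=rewrite | github.com/sivasunku/Hackathons | Trove/testgen.py | make_layers
-- ===== SOURCE A (Python) =====
-- def make_layers(m):
--     # Layers for m=5, 2,1,0
--     no_of_layers = m // 2
--     layers = []
--     for x in range(0, no_of_layers):
--         tmp = []
--         # Move East
--         i = x
--         for j in range(x, m - x):
--             tmp.append((i, j))
--         # Move South
--         j = m - 1 - x
--         for i in range(x + 1, m - x):
--             tmp.append((i, j))
--         # Move West
--         i = m - 1 - x
--         for j in range(m - x - 2, x - 1, -1):
--             tmp.append((i, j))
--         # Move North
--         j = x
--         for i in range(m - x - 2, x, -1):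
--             tmp.append((i, j))
--
--         layers.append(tmp)
--     return layers
-- ===== SOURCE B (Python) =====
-- def make_layers(m):
--     layers = []
--     for x in range(m // 2):
--         lo, hi = x, m - 1 - x
--         dirs = [(0, 1), (1, 0), (0, -1), (-1, 0)]
--         d = 0
--         i, j = lo, lo
--         ring = []
--         for _ in range(4 * (hi - lo)):
--             ring.append((i, j))
--             di, dj = dirs[d]
--             ni, nj = i + di, j + dj
--             if not (lo <= ni <= hi and lo <= nj <= hi):
--                 d = (d + 1) % 4
--                 di, dj = dirs[d]
--                 ni, nj = i + di, j + dj
--             i, j = ni, nj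
--         layers.append(ring)
--     return layers
-- ===== Notes on version B (the rewrite author's own statement) =====
-- stated objective: alternative
-- what changed: Replaces A's hardcoded East/South/West/North loops per layer with a single direction-vector spiral walk: one bounded loop per ring that appends the current cell and turns clockwise whenever the tentative step leaves the ring's bounds, collecting rings with a map instead of repeated appends.
import Mathlib
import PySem

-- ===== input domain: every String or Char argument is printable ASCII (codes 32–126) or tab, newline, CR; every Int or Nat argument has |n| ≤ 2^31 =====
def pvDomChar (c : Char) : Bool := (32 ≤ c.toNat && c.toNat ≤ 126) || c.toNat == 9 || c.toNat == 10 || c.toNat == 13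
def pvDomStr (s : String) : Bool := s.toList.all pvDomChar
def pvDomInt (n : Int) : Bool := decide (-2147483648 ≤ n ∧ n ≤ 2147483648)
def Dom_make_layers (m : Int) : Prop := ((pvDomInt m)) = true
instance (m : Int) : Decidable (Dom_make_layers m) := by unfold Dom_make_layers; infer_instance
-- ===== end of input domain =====

-- B replaces the four hardcoded per-direction loops of A by a single direction-vector
-- spiral walk of exactly 4*(hi-lo) steps per ring (objective: alternative algorithm).

-- ===== PORT A =====
def make_layers (m : Int) : List (List (Int × Int)) :=
  let no_of_layers := PySem.Int.floordiv m 2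
  (PySem.List.pyRange 0 no_of_layers 1).foldl (fun layers x =>
    let tmp : List (Int × Int) := []
    -- Move East
    let i := x
    let tmp := (PySem.List.pyRange x (m - x) 1).foldl (fun tmp j => tmp ++ [(i, j)]) tmp
    -- Move South
    let j := m - 1 - x
    let tmp := (PySem.List.pyRange (x + 1) (m - x) 1).foldl (fun tmp i => tmp ++ [(i, j)]) tmp
    -- Move West
    let i := m - 1 - x
    let tmp := (PySem.List.pyRange (m - x - 2) (x - 1) (-1)).foldl (fun tmp j => tmp ++ [(i, j)]) tmp
    -- Move North
    let j := x
    let tmp := (PySem.List.pyRange (m - x - 2) x (-1)).foldl (fun tmp i => tmp ++ [(i, j)]) tmp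
    layers ++ [tmp]) []

-- ===== PORT B =====
-- dirs[d] of Source B (the fixed 4-element direction table, indexed by d ∈ {0,1,2,3})
def spiralDir (d : Nat) : Int × Int :=
  if d = 0 then (0, 1) else if d = 1 then (1, 0) else if d = 2 then (0, -1) else (-1, 0)

-- the 'for _ in range(…)' loop of Source B: fuel = remaining iterations, state (i, j, d)
def spiralWalk (lo hi : Int) : Nat → Int → Int → Nat → List (Int × Int)
  | 0, _, _, _ => []
  | n + 1, i, j, d =>
    let p := spiralDir d
    let ni := i + p.1
    let nj := j + p.2
    if lo ≤ ni ∧ ni ≤ hi ∧ lo ≤ nj ∧ nj ≤ hi then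
      (i, j) :: spiralWalk lo hi n ni nj d
    else
      let d' := (d + 1) % 4
      let q := spiralDir d'
      (i, j) :: spiralWalk lo hi n (i + q.1) (j + q.2) d'

def make_layers_alt (m : Int) : List (List (Int × Int)) :=
  (PySem.List.pyRange 0 (PySem.Int.floordiv m 2) 1).map (fun x =>
    let lo := x
    let hi := m - 1 - x
    spiralWalk lo hi (4 * (hi - lo)).toNat lo lo 0)

-- ===== PRECONDITION & SPEC =====
def Spec_make_layers (m : Int) (out : List (List (Int × Int))) : Prop := out = make_layers_alt m
instance (m : Int) (out : List (List (Int × Int))) : Decidable (Spec_make_layers m out) := by unfold Spec_make_layers; infer_instance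

-- ===== CLAIM (what is proved, stated in full; the proofs are below) =====
def Claim_equal_make_layers : Prop := ∀ (m : Int), Dom_make_layers m → Spec_make_layers m (make_layers m)

-- ===== LEMMAS AND PROOFS =====

theorem walkE (lo hi : Int) (h : lo < hi) : ∀ (n rest : Nat) (j : Int), lo ≤ j → j + n = hi →
    spiralWalk lo hi (n + 1 + rest) lo j 0 =
      ((PySem.List.pyRange j (hi + 1) 1).map (fun t => (lo, t))) ++ spiralWalk lo hi rest (lo + 1) hi 1 := by
  intro n
  induction n with
  | zero =>
    intro rest j hj hjn
    have hje : j = hi := by omega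
    subst hje
    have hf : 0 + 1 + rest = rest + 1 := by omega
    rw [hf]
    simp only [spiralWalk, spiralDir]
    norm_num
  | succ n ih =>
    intro rest j hj hjn
    have hjlt : j < hi := by omega
    have hf : n + 1 + 1 + rest = (n + 1 + rest) + 1 := by omega
    rw [hf]
    simp only [spiralWalk, spiralDir]
    norm_num
    rw [if_pos (by omega)]
    rw [ih rest (j + 1) (by omega) (by omega)]
    rw [PySem.List.pyRange_one_cons (by omega : j < hi + 1)]
    simp

theorem walkS (lo hi : Int) (h : lo < hi) : ∀ (n rest : Nat) (i : Int), lo + 1 ≤ i → i + n = hi →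
    spiralWalk lo hi (n + 1 + rest) i hi 1 =
      ((PySem.List.pyRange i (hi + 1) 1).map (fun t => (t, hi))) ++ spiralWalk lo hi rest hi (hi - 1) 2 := by
  intro n
  induction n with
  | zero =>
    intro rest i h1 hn
    have hie : i = hi := by omega
    subst hie
    have hf : 0 + 1 + rest = rest + 1 := by omega
    rw [hf]
    simp only [spiralWalk, spiralDir]
    norm_num
    have he : i + -1 = i - 1 := by ring
    rw [he]
  | succ n ih =>
    intro rest i h1 hn
    have hf : n + 1 + 1 + rest = (n + 1 + rest) + 1 := by omega
    rw [hf]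
    simp only [spiralWalk, spiralDir]
    norm_num
    rw [if_pos (by omega)]
    rw [ih rest (i + 1) (by omega) (by omega)]
    rw [PySem.List.pyRange_one_cons (by omega : i < hi + 1)]
    simp

theorem walkW (lo hi : Int) (h : lo < hi) : ∀ (n rest : Nat) (j : Int), j ≤ hi - 1 → j - n = lo →
    spiralWalk lo hi (n + 1 + rest) hi j 2 =
      ((PySem.List.pyRange j (lo - 1) (-1)).map (fun t => (hi, t))) ++ spiralWalk lo hi rest (hi - 1) lo 3 := by
  intro n
  induction n with
  | zero =>
    intro rest j hj hn
    have hje : j = lo := by omega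
    subst hje
    have hf : 0 + 1 + rest = rest + 1 := by omega
    rw [hf]
    simp only [spiralWalk, spiralDir]
    norm_num
    rw [PySem.List.pyRange_neg_one_cons (by omega : j - 1 < j),
        PySem.List.pyRange_neg_one_eq_nil (by omega : j - 1 ≤ j - 1)]
    norm_num
    have he : hi + -1 = hi - 1 := by ring
    rw [he]
  | succ n ih =>
    intro rest j hj hn
    have hf : n + 1 + 1 + rest = (n + 1 + rest) + 1 := by omega
    rw [hf]
    simp only [spiralWalk, spiralDir]
    norm_num
    rw [if_pos (by omega)]
    have he : j + -1 = j - 1 := by ring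
    rw [he]
    rw [ih rest (j - 1) (by omega) (by omega)]
    rw [PySem.List.pyRange_neg_one_cons (by omega : lo - 1 < j)]
    simp

theorem walkN (lo hi : Int) (h : lo < hi) : ∀ (n : Nat) (i : Int), lo + 1 ≤ i → i ≤ hi - 1 → i - n = lo + 1 →
    spiralWalk lo hi (n + 1) i lo 3 =
      (PySem.List.pyRange i lo (-1)).map (fun t => (t, lo)) := by
  intro n
  induction n with
  | zero =>
    intro i h1 h2 h3
    have hie : i = lo + 1 := by omega
    subst hie
    simp only [spiralWalk, spiralDir]
    norm_num
    rw [PySem.List.pyRange_neg_one_cons (by omega : lo < lo + 1),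
        PySem.List.pyRange_neg_one_eq_nil (by omega : lo + 1 - 1 ≤ lo)]
    simp
  | succ n ih =>
    intro i h1 h2 h3
    have hf : n + 1 + 1 = (n + 1) + 1 := by omega
    rw [hf]
    rw [spiralWalk]
    simp only [spiralDir]
    norm_num
    rw [if_pos (by omega)]
    have he : i + -1 = i - 1 := by ring
    rw [he]
    rw [ih (i - 1) (by omega) (by omega) (by omega)]
    rw [PySem.List.pyRange_neg_one_cons (by omega : lo < i)]
    simp

theorem ring_eq (lo hi : Int) (h : lo < hi) :
    spiralWalk lo hi (4 * (hi - lo)).toNat lo lo 0 =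
      ((PySem.List.pyRange lo (hi + 1) 1).map (fun t => (lo, t)))
      ++ ((PySem.List.pyRange (lo + 1) (hi + 1) 1).map (fun t => (t, hi)))
      ++ ((PySem.List.pyRange (hi - 1) (lo - 1) (-1)).map (fun t => (hi, t)))
      ++ ((PySem.List.pyRange (hi - 1) lo (-1)).map (fun t => (t, lo))) := by
  obtain ⟨e, he⟩ : ∃ e : Nat, hi = lo + e + 1 := ⟨(hi - lo - 1).toNat, by omega⟩
  have hfuel : (4 * (hi - lo)).toNat = ((e + 1) + 1 + ((e + 1) + ((e + 1) + e))) := by omega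
  rw [hfuel]
  rw [walkE lo hi h (e + 1) _ lo (le_refl lo) (by omega)]
  rw [walkS lo hi h e _ (lo + 1) (by omega) (by omega)]
  rw [walkW lo hi h e e (hi - 1) (by omega) (by omega)]
  cases e with
  | zero =>
    rw [PySem.List.pyRange_neg_one_eq_nil (by omega : hi - 1 ≤ lo)]
    simp [spiralWalk]
  | succ f =>
    rw [walkN lo hi h f (hi - 1) (by omega) (by omega) (by omega)]
    simp [List.append_assoc]

-- ===== VERDICT (by name: the statement is the Claim_ definition above) =====
theorem make_layers_spec : Claim_equal_make_layers := by
  intro m _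
  unfold Spec_make_layers make_layers make_layers_alt
  rw [PySem.List.foldl_append_singleton_eq_map]
  simp only [List.nil_append]
  apply List.map_congr_left
  intro x hx
  rw [PySem.List.mem_pyRange_one] at hx
  have hfd : PySem.Int.floordiv m 2 = m / 2 := PySem.Int.floordiv_eq_ediv_of_pos (by omega)
  rw [hfd] at hx
  have hlt : x < m - 1 - x := by omega
  rw [PySem.List.foldl_append_singleton_eq_map, PySem.List.foldl_append_singleton_eq_map,
      PySem.List.foldl_append_singleton_eq_map, PySem.List.foldl_append_singleton_eq_map]
  have h1 : m - x = (m - 1 - x) + 1 := by ring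
  have h2 : m - x - 2 = (m - 1 - x) - 1 := by ring
  rw [h2, h1]
  rw [ring_eq x (m - 1 - x) hlt]
  simp
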